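-- pv_equiv track=rewrite | github.com/ryanpate/CHAgent | core/agent.py | detect_confirmation
-- ===== SOURCE A (Python) =====
-- def detect_confirmation(message: str) -> bool:
--     """
--     Detect if a user message is a confirmation/affirmation.
--
--     Args:
--         message: The user's message.
--
--     Returns:
--         True if the message is a confirmation.
--     """
--     message_lower = message.lower().strip()
--
--     # Direct affirmations
--     affirmations = [
--         'yes', 'yeah', 'yep', 'yup', 'sure', 'ok', 'okay', 'please',
--         'please do', 'go ahead', 'do it', 'yes please', 'that would be great',
--         'sounds good', 'perfect', 'absolutely', 'definitely', 'of course',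
--         'correct', 'right', 'that\'s right', 'exactly', 'yes, please',
--         'y', 'yea', 'aye', 'affirmative'
--     ]
--
--     if message_lower in affirmations:
--         return True
--
--     # Check for affirmation at the start of the message
--     for affirmation in affirmations:
--         if message_lower.startswith(affirmation + ' ') or message_lower.startswith(affirmation + ','):
--             return True
--         if message_lower.startswith(affirmation + '.') or message_lower.startswith(affirmation + '!'):
--             return True
--
--     return False
-- ===== SOURCE B (Python) =====
-- _AFFIRMATIONS = frozenset([
--     'yes', 'yeah', 'yep', 'yup', 'sure', 'ok', 'okay', 'please',
--     'please do', 'go ahead', 'do it', 'yes please', 'that would be great',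
--     'sounds good', 'perfect', 'absolutely', 'definitely', 'of course',
--     'correct', 'right', 'that\'s right', 'exactly', 'yes, please',
--     'y', 'yea', 'aye', 'affirmative'
-- ])
-- _MAX_LEN = max(len(a) for a in _AFFIRMATIONS)
-- _DELIMS = ' ,.!'
--
--
-- def detect_confirmation(message: str) -> bool:
--     """Detect if a user message is a confirmation/affirmation."""
--     m = message.lower().strip()
--     n = len(m)
--     # Scan prefixes of the message instead of scanning the affirmation list:
--     # m is a confirmation iff some prefix m[:i] is an affirmation and is
--     # followed by a delimiter or the end of the message.
--     for i in range(1, min(n, _MAX_LEN) + 1):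
--         if (i == n or m[i] in _DELIMS) and m[:i] in _AFFIRMATIONS:
--             return True
--     return False
-- ===== Notes on version B (the rewrite author's own statement) =====
-- stated objective: alternative
-- what changed: Instead of scanning the affirmation list with an exact-match membership test plus four startswith checks per entry, B scans the prefixes of the (lowered, stripped) message up to the maximum affirmation length and tests each prefix against a frozenset of affirmations, accepting when the prefix is followed by a delimiter or the end of the message.
import Mathlib
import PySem

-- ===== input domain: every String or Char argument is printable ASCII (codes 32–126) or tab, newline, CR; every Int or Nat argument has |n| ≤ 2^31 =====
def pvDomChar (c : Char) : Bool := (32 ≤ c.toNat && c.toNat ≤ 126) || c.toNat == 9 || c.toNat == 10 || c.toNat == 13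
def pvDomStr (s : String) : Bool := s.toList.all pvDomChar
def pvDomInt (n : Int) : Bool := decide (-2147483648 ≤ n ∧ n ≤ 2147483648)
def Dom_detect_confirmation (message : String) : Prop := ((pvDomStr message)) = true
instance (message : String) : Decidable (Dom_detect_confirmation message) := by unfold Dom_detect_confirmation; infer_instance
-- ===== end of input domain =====

-- B scans the (bounded) prefixes of the message against a set of affirmations instead of
-- scanning the affirmation list with four startswith tests per entry; same return value everywhere.

-- ===== PORT A =====
def affirmationsA : List (List Char) :=
  ["yes", "yeah", "yep", "yup", "sure", "ok", "okay", "please",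
   "please do", "go ahead", "do it", "yes please", "that would be great",
   "sounds good", "perfect", "absolutely", "definitely", "of course",
   "correct", "right", "that's right", "exactly", "yes, please",
   "y", "yea", "aye", "affirmative"].map String.toList

def detect_confirmation (message : String) : Bool :=
  let m := PySem.Chars.strip (PySem.Chars.lower message.toList)
  if affirmationsA.contains m then true
  else
    affirmationsA.any (fun a =>
      (PySem.Chars.startswith m (a ++ [' ']) || PySem.Chars.startswith m (a ++ [','])) ||
      (PySem.Chars.startswith m (a ++ ['.']) || PySem.Chars.startswith m (a ++ ['!'])))

-- ===== PORT B =====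
def affirmationsB : PySem.Set (List Char) :=
  PySem.Set.ofList
    (["yes", "yeah", "yep", "yup", "sure", "ok", "okay", "please",
      "please do", "go ahead", "do it", "yes please", "that would be great",
      "sounds good", "perfect", "absolutely", "definitely", "of course",
      "correct", "right", "that's right", "exactly", "yes, please",
      "y", "yea", "aye", "affirmative"].map String.toList)

-- max(len(a) for a in _AFFIRMATIONS); the set is a non-empty literal, so the getD default is unreachable
def maxLenB : Int := (PySem.List.max? (affirmationsB.map PySem.Chars.len) (fun x => x)).getD 0

def delimsB : List Char := " ,.!".toList

def detect_confirmation_alt (message : String) : Bool :=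
  let m := PySem.Chars.strip (PySem.Chars.lower message.toList)
  let n := PySem.Chars.len m
  (PySem.List.pyRange 1 (min n maxLenB + 1) 1).any (fun i =>
    (decide (i = n) ||
      -- m[i] in _DELIMS; the none branch is unreachable here since 1 ≤ i < n
      (match PySem.List.pyGet? m i with
       | some c => PySem.Chars.isIn [c] delimsB
       | none => false)) &&
    PySem.Set.contains affirmationsB (PySem.List.slice m none (some i)))

-- ===== PRECONDITION & SPEC =====
def Spec_detect_confirmation (message : String) (out : Bool) : Prop := out = detect_confirmation_alt message
instance (message : String) (out : Bool) : Decidable (Spec_detect_confirmation message out) := by unfold Spec_detect_confirmation; infer_instance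

-- ===== CLAIM (what is proved, stated in full; the proofs are below) =====
def Claim_equal_detect_confirmation : Prop := ∀ (message : String), Dom_detect_confirmation message → Spec_detect_confirmation message (detect_confirmation message)

-- ===== LEMMAS AND PROOFS =====

theorem maxLenB_eq : maxLenB = 19 := by decide

theorem affirmationsA_ne_nil : ∀ a ∈ affirmationsA, a ≠ [] := by decide

theorem affirmationsA_len_le : ∀ a ∈ affirmationsA, (a.length : Int) ≤ 19 := by decide

theorem mem_affirmationsB_iff (x : List Char) : x ∈ affirmationsB ↔ x ∈ affirmationsA := by
  unfold affirmationsB affirmationsA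
  exact PySem.Set.mem_ofList _ _

theorem singleton_infix_iff (c : Char) (l : List Char) : [c] <:+: l ↔ c ∈ l := by
  constructor
  · intro h
    exact (List.singleton_sublist).1 h.sublist
  · intro h
    obtain ⟨s, t, rfl⟩ := List.append_of_mem h
    exact ⟨s, t, by simp⟩


theorem containsB_iff (x : List Char) : PySem.Set.contains affirmationsB x = true ↔ x ∈ affirmationsA := by
  simp only [PySem.Set.contains, List.contains_iff_mem]
  exact mem_affirmationsB_iff x

theorem delimsB_eq : delimsB = [' ', ',', '.', '!'] := by decide

theorem core (m : List Char) :
    (if affirmationsA.contains m then true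
     else
       affirmationsA.any (fun a =>
         (PySem.Chars.startswith m (a ++ [' ']) || PySem.Chars.startswith m (a ++ [','])) ||
         (PySem.Chars.startswith m (a ++ ['.']) || PySem.Chars.startswith m (a ++ ['!'])))) =
    ((PySem.List.pyRange 1 (min (PySem.Chars.len m) maxLenB + 1) 1).any (fun i =>
      (decide (i = PySem.Chars.len m) ||
        (match PySem.List.pyGet? m i with
         | some c => PySem.Chars.isIn [c] delimsB
         | none => false)) &&
      PySem.Set.contains affirmationsB (PySem.List.slice m none (some i)))) := by
  rw [Bool.eq_iff_iff]
  simp only [PySem.Chars.len_eq, maxLenB_eq]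
  constructor
  · intro h
    rw [List.any_eq_true]
    by_cases hc : affirmationsA.contains m
    · have hm : m ∈ affirmationsA := List.contains_iff_mem.mp hc
      have h1 : 0 < m.length := List.length_pos_of_ne_nil (affirmationsA_ne_nil m hm)
      have h2 : (m.length : Int) ≤ 19 := affirmationsA_len_le m hm
      refine ⟨(m.length : Int), PySem.List.mem_pyRange_one.mpr ⟨by omega, by omega⟩, ?_⟩
      rw [Bool.and_eq_true]
      refine ⟨by simp, ?_⟩
      rw [PySem.List.slice_to m (by omega), containsB_iff]
      simpa using hm
    · rw [if_neg hc, List.any_eq_true] at h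
      obtain ⟨a, ha, hpre⟩ := h
      have h1 : 0 < a.length := List.length_pos_of_ne_nil (affirmationsA_ne_nil a ha)
      have h2 : (a.length : Int) ≤ 19 := affirmationsA_len_le a ha
      simp only [Bool.or_eq_true, PySem.Chars.startswith_iff] at hpre
      have key : ∃ c, c ∈ delimsB ∧ (a ++ [c]) <+: m := by
        rcases hpre with (h | h) | (h | h)
        exacts [⟨' ', by decide, h⟩, ⟨',', by decide, h⟩, ⟨'.', by decide, h⟩, ⟨'!', by decide, h⟩]
      obtain ⟨c, hcd, t, ht⟩ := key
      have hm' : m = a ++ c :: t := by simpa using ht.symm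
      have hlen : a.length + 1 ≤ m.length := by
        subst hm'; simp
      refine ⟨(a.length : Int), PySem.List.mem_pyRange_one.mpr ⟨by omega, by omega⟩, ?_⟩
      rw [Bool.and_eq_true]
      constructor
      · have hg : PySem.List.pyGet? m (a.length : Int) = some c := by
          rw [hm']; exact PySem.List.pyGet?_append_length a t c
        have hin : PySem.Chars.isIn [c] delimsB = true :=
          (PySem.Chars.isIn_iff_infix _ _).mpr ((singleton_infix_iff c delimsB).mpr hcd)
        simp [hg, hin]
      · rw [PySem.List.slice_to m (by omega), containsB_iff]
        have : m.take a.length = a := by rw [hm']; simp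
        simp [this, ha]
  · intro h
    rw [List.any_eq_true] at h
    obtain ⟨i, hi, hp⟩ := h
    rw [PySem.List.mem_pyRange_one] at hi
    have h0 : 0 ≤ i := by omega
    set k := i.toNat with hk
    have hik : i = (k : Int) := by omega
    rw [Bool.and_eq_true] at hp
    obtain ⟨hd, hs⟩ := hp
    rw [PySem.List.slice_to m h0, containsB_iff] at hs
    rw [Bool.or_eq_true] at hd
    by_cases hin : i = (m.length : Int)
    · have hkm : m.take k = m := by
        have : k = m.length := by omega
        rw [this, List.take_length]
      rw [hkm] at hs
      rw [if_pos (List.contains_iff_mem.mpr hs)]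
    · rcases hd with hd | hd
      · rw [decide_eq_true_iff] at hd; exact absurd hd hin
      · have hget : PySem.List.pyGet? m i = m[k]? := PySem.List.pyGet?_of_nonneg m h0
        rcases hmk : m[k]? with _ | c
        · rw [hget, hmk] at hd; simp at hd
        · rw [hget, hmk] at hd
          have hcd : c ∈ delimsB :=
            (singleton_infix_iff c delimsB).mp ((PySem.Chars.isIn_iff_infix _ _).mp hd)
          have hklt : k < m.length := by
            by_contra hh
            rw [List.getElem?_eq_none (by omega)] at hmk
            cases hmk
          have hpre : (m.take k ++ [c]) <+: m := by
            have h' := List.take_prefix (k + 1) m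
            rwa [List.take_add_one, hmk, Option.toList_some] at h'
          by_cases hc : affirmationsA.contains m
          · rw [if_pos hc]
          · rw [if_neg hc, List.any_eq_true]
            refine ⟨m.take k, hs, ?_⟩
            simp only [Bool.or_eq_true, PySem.Chars.startswith_iff]
            have hc4 : c = ' ' ∨ c = ',' ∨ c = '.' ∨ c = '!' := by
              rw [delimsB_eq] at hcd; simpa using hcd
            rcases hc4 with rfl | rfl | rfl | rfl
            · exact Or.inl (Or.inl hpre)
            · exact Or.inl (Or.inr hpre)
            · exact Or.inr (Or.inl hpre)
            · exact Or.inr (Or.inr hpre)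

-- ===== VERDICT (by name: the statement is the Claim_ definition above) =====
theorem detect_confirmation_spec : Claim_equal_detect_confirmation := by
  intro message _
  unfold Spec_detect_confirmation detect_confirmation detect_confirmation_alt
  exact core _
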